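-- pv_equiv track=rewrite | github.com/f4dszz/multi-agent-collaboration | backend/app/services/review_parser.py | _strip_markdown_wrappers
-- ===== SOURCE A (Python) =====
-- def _strip_markdown_wrappers(text: str) -> str:
--     cleaned = text.strip()
--     wrappers = ("**", "__", "`", "*", "_")
--     changed = True
--     while cleaned and changed:
--         changed = False
--         for wrapper in wrappers:
--             if cleaned.startswith(wrapper) and cleaned.endswith(wrapper) and len(cleaned) > len(wrapper) * 2:
--                 cleaned = cleaned[len(wrapper) : -len(wrapper)].strip()
--                 changed = True
--     return cleaned
-- ===== SOURCE B (Python) =====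
-- def _strip_markdown_wrappers(text: str) -> str:
--     # Two-pointer rewrite: keep a window [i, j) into the original string and move
--     # the endpoints inward past whitespace and matched wrapper pairs; slice once.
--     s = text
--     i, j = 0, len(s)
--     while True:
--         while i < j and s[i].isspace():
--             i += 1
--         while i < j and s[j - 1].isspace():
--             j -= 1
--         for w in ("**", "__", "`", "*", "_"):
--             k = len(w)
--             if j - i > 2 * k and s[i:i + k] == w and s[j - k:j] == w:
--                 i += k
--                 j -= k
--                 break
--         else:
--             return s[i:j]
-- ===== Notes on version B (the rewrite author's own statement) =====
-- stated objective: alternative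
-- what changed: Replaces A's fixpoint loop that repeatedly allocates stripped substring copies (cleaned = cleaned[k:-k].strip() inside a while-changed/for-wrapper loop) with a two-pointer scan that keeps a window [i, j) of index positions into the original string, moves the endpoints inward past whitespace and matched wrapper pairs, and slices exactly once at the end.
import Mathlib
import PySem

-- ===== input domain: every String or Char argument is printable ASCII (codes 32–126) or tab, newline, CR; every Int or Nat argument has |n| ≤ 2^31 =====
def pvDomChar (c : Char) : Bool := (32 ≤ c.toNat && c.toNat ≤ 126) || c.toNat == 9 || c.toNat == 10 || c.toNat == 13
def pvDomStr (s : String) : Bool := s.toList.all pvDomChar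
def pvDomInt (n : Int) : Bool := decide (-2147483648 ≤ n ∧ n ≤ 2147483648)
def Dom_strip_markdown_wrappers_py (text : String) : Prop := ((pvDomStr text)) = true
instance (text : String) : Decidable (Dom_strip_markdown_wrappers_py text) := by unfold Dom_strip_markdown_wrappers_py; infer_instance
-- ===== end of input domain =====

-- B replaces A's fixpoint loop over freshly allocated stripped substrings by a two-pointer scan
-- that only moves two index endpoints inward over the ORIGINAL string and slices once at the end;
-- objective: alternative (different data handling, no intermediate strings).

-- ===== PORT A =====
-- A-side helpers: the wrapper tuple, the wrapper test, the removal step, on List Char.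
def mdWrappers : List (List Char) := [['*','*'], ['_','_'], ['`'], ['*'], ['_']]

-- cleaned.startswith(w) and cleaned.endswith(w) and len(cleaned) > len(w) * 2
def mdApp (w s : List Char) : Bool :=
  PySem.Chars.startswith s w && PySem.Chars.endswith s w && decide (w.length * 2 < s.length)

-- cleaned[len(w) : -len(w)]
def mdSlice (w s : List Char) : List Char :=
  PySem.List.slice s (some (w.length : Int)) (some (-(w.length : Int)))

-- cleaned[len(w) : -len(w)].strip()
def mdCut (w s : List Char) : List Char := PySem.Chars.strip (mdSlice w s)

-- ---- termination support (cited by the ports' decreasing_by) ----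
theorem pv_strip_len_le (s : List Char) : (PySem.Chars.strip s).length ≤ s.length := by
  simp only [PySem.Chars.strip, PySem.Chars.lstrip, PySem.Chars.rstrip, List.length_reverse]
  calc (List.dropWhile PySem.Chars.isspace (List.dropWhile PySem.Chars.isspace s).reverse).length
      ≤ (List.dropWhile PySem.Chars.isspace s).reverse.length := List.length_dropWhile_le _ _
    _ ≤ s.length := by simpa using List.length_dropWhile_le PySem.Chars.isspace s

theorem mdSlice_len_lt (w s : List Char) (hw : w ∈ mdWrappers) (h : mdApp w s = true) :
    (mdSlice w s).length < s.length := by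
  have hlen : w.length * 2 < s.length := by
    have := (Bool.and_eq_true ..).mp h
    exact of_decide_eq_true this.2
  have hwpos : 1 ≤ w.length := by
    fin_cases hw <;> simp
  rw [mdSlice, PySem.List.length_slice,
    PySem.List.clampIdx_neg_natCast s.length w.length hwpos,
    PySem.List.clampIdx_natCast]
  omega

theorem mdCut_len_lt (w s : List Char) (hw : w ∈ mdWrappers) (h : mdApp w s = true) :
    (mdCut w s).length < s.length :=
  Nat.lt_of_le_of_lt (pv_strip_len_le _) (mdSlice_len_lt w s hw h)

-- the body of A's `for wrapper in wrappers:` loop, as the folded step function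
def mdStep (st : List Char × Bool) (w : List Char) : List Char × Bool :=
  if mdApp w st.1 then (mdCut w st.1, true) else st

theorem mdFold_snd_true : ∀ (ws : List (List Char)) (s : List Char),
    (ws.foldl mdStep (s, true)).2 = true := by
  intro ws
  induction ws with
  | nil => intro s; rfl
  | cons w ws ih =>
    intro s
    by_cases h : mdApp w s = true <;> simp [List.foldl_cons, mdStep, h, ih]

theorem mdFold_false : ∀ (ws : List (List Char)) (s : List Char) (b : Bool),
    (ws.foldl mdStep (s, b)).2 = false → ws.foldl mdStep (s, b) = (s, b) := by
  intro ws
  induction ws with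
  | nil => intro s b _; rfl
  | cons w ws ih =>
    intro s b hfalse
    by_cases h : mdApp w s = true
    · exfalso
      have htrue : (ws.foldl mdStep (mdCut w s, true)).2 = true := mdFold_snd_true ws _
      rw [List.foldl_cons, mdStep, if_pos h] at hfalse
      rw [htrue] at hfalse
      exact Bool.noConfusion hfalse
    · rw [List.foldl_cons, mdStep, if_neg h] at hfalse ⊢
      exact ih s b hfalse

theorem mdFold_len : ∀ (ws : List (List Char)), (∀ w ∈ ws, w ∈ mdWrappers) →
    ∀ (s : List Char) (b : Bool), ((ws.foldl mdStep (s, b)).1).length ≤ s.length := by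
  intro ws
  induction ws with
  | nil => intro _ s b; exact le_refl _
  | cons w ws ih =>
    intro hmem s b
    rw [List.foldl_cons, mdStep]
    by_cases h : mdApp w s = true
    · rw [if_pos h]
      exact le_trans (ih (fun x hx => hmem x (List.mem_cons_of_mem _ hx)) _ _)
        (le_of_lt (mdCut_len_lt w s (hmem w (List.mem_cons_self ..)) h))
    · rw [if_neg h]
      exact ih (fun x hx => hmem x (List.mem_cons_of_mem _ hx)) s b

theorem mdFold_true_lt : ∀ (ws : List (List Char)), (∀ w ∈ ws, w ∈ mdWrappers) →
    ∀ (s : List Char), (ws.foldl mdStep (s, false)).2 = true →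
    ((ws.foldl mdStep (s, false)).1).length < s.length := by
  intro ws
  induction ws with
  | nil => intro _ s h; exact absurd h (by simp [List.foldl_nil])
  | cons w ws ih =>
    intro hmem s htrue
    rw [List.foldl_cons, mdStep]
    by_cases h : mdApp w s = true
    · rw [if_pos h]
      exact Nat.lt_of_le_of_lt (mdFold_len ws (fun x hx => hmem x (List.mem_cons_of_mem _ hx)) _ _)
        (mdCut_len_lt w s (hmem w (List.mem_cons_self ..)) h)
    · rw [if_neg h]
      rw [List.foldl_cons, mdStep, if_neg h] at htrue
      exact ih (fun x hx => hmem x (List.mem_cons_of_mem _ hx)) s htrue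

-- one full `for wrapper in wrappers:` pass of A, returning (cleaned, changed)
def mdPass (s : List Char) : List Char × Bool := mdWrappers.foldl mdStep (s, false)

-- `changed = True; while cleaned and changed: changed = False; <pass>`
def mdLoop (s : List Char) (changed : Bool) : List Char :=
  if s ≠ [] ∧ changed = true then mdLoop (mdPass s).1 (mdPass s).2 else s
termination_by 2 * s.length + (if changed then 1 else 0)
decreasing_by
  rename_i h
  cases hb : (mdPass s).2
  · have := mdFold_false mdWrappers s false (by rw [← mdPass]; exact hb)
    rw [mdPass] at *
    rw [this]
    simp [h.2]
  · have hlt := mdFold_true_lt mdWrappers (by intro w hw; exact hw) s (by rw [← mdPass]; exact hb)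
    rw [← mdPass] at hlt
    rw [h.2]
    simp only [reduceIte]
    omega

def strip_markdown_wrappers_py (text : String) : String :=
  String.ofList (mdLoop (PySem.Chars.strip text.toList) true)

-- ===== PORT B =====
-- B-side helpers: B never builds intermediate strings; it keeps two cursor positions i ≤ j
-- into the original character list and only compares short slices at the cursors.
def pvWrapB : List (List Char) := [['*','*'], ['_','_'], ['`'], ['*'], ['_']]

-- `while i < j and s[i].isspace(): i += 1`
-- (s.getD i ' ' is exact for Python's s[i]: the loop only reads i with i < j ≤ len(s))
def bTrimL (s : List Char) (i j : Nat) : Nat :=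
  if h : i < j ∧ PySem.Chars.isspace (s.getD i ' ') = true then bTrimL s (i + 1) j else i
termination_by j - i
decreasing_by omega

-- `while i < j and s[j - 1].isspace(): j -= 1`
def bTrimR (s : List Char) (i j : Nat) : Nat :=
  if h : i < j ∧ PySem.Chars.isspace (s.getD (j - 1) ' ') = true then bTrimR s i (j - 1) else j
termination_by j - i
decreasing_by omega

-- `j - i > 2 * k and s[i:i+k] == w and s[j-k:j] == w`
def bCond (s : List Char) (i j : Nat) (w : List Char) : Bool :=
  decide (2 * w.length < j - i)
    && (PySem.List.slice s (some (i : Int)) (some ((i + w.length : Nat) : Int)) == w)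
    && (PySem.List.slice s (some ((j - w.length : Nat) : Int)) (some (j : Int)) == w)

-- ---- cursor bounds (cited by bLoop's decreasing_by) ----
theorem le_bTrimL (s : List Char) (i j : Nat) : i ≤ bTrimL s i j := by
  fun_induction bTrimL s i j with
  | case1 i h ih => omega
  | case2 i h => exact Nat.le_refl i

theorem bTrimR_le (s : List Char) (i j : Nat) : bTrimR s i j ≤ j := by
  fun_induction bTrimR s i j with
  | case1 j h ih => omega
  | case2 j h => exact Nat.le_refl j

theorem pvWrapB_len_pos (w : List Char) (hw : w ∈ pvWrapB) : 1 ≤ w.length := by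
  fin_cases hw <;> simp

-- `while True: <trim>; for w in wrappers: if <bCond>: i += k; j -= k; break / else: return s[i:j]`
def bLoop (s : List Char) (i j : Nat) : Nat × Nat :=
  match hf : pvWrapB.find? (bCond s (bTrimL s i j) (bTrimR s (bTrimL s i j) j)) with
  | some w => bLoop s (bTrimL s i j + w.length) (bTrimR s (bTrimL s i j) j - w.length)
  | none => (bTrimL s i j, bTrimR s (bTrimL s i j) j)
termination_by j - i
decreasing_by
  have hcond := List.find?_some hf
  have hk : 2 * w.length < bTrimR s (bTrimL s i j) j - bTrimL s i j := by
    have := (Bool.and_eq_true ..).mp ((Bool.and_eq_true ..).mp hcond).1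
    exact of_decide_eq_true this.1
  have h1 := le_bTrimL s i j
  have h2 := bTrimR_le s (bTrimL s i j) j
  have h3 := pvWrapB_len_pos w (List.mem_of_find?_eq_some hf)
  omega

def strip_markdown_wrappers_py_alt (text : String) : String :=
  String.ofList (PySem.List.slice text.toList
    (some ((bLoop text.toList 0 text.toList.length).1 : Int))
    (some ((bLoop text.toList 0 text.toList.length).2 : Int)))

-- ===== PRECONDITION & SPEC =====
def Spec_strip_markdown_wrappers_py (text : String) (out : String) : Prop := out = strip_markdown_wrappers_py_alt text
instance (text : String) (out : String) : Decidable (Spec_strip_markdown_wrappers_py text out) := by unfold Spec_strip_markdown_wrappers_py; infer_instance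

-- ===== CLAIM (what is proved, stated in full; the proofs are below) =====
def Claim_equal_strip_markdown_wrappers_py : Prop := ∀ (text : String), Dom_strip_markdown_wrappers_py text → Spec_strip_markdown_wrappers_py text (strip_markdown_wrappers_py text)

-- ===== LEMMAS AND PROOFS =====

-- The common specification both ports are reduced to: strip, peel the first matching
-- wrapper, recurse on the core.
def peelMd (s : List Char) : List Char :=
  let s1 := PySem.Chars.strip s
  match h : mdWrappers.find? (fun w => mdApp w s1) with
  | some w => peelMd (mdSlice w s1)
  | none => s1
termination_by s.length
decreasing_by
  have hw : w ∈ mdWrappers := List.mem_of_find?_eq_some h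
  have happ : mdApp w (PySem.Chars.strip s) = true := by simpa using List.find?_some h
  exact Nat.lt_of_lt_of_le (mdSlice_len_lt w _ hw happ) (pv_strip_len_le s)

theorem pv_rstrip_prefix (u : List Char) : PySem.Chars.rstrip u <+: u := by
  have h : List.dropWhile PySem.Chars.isspace u.reverse <:+ u.reverse := List.dropWhile_suffix _
  rw [PySem.Chars.rstrip, show u = u.reverse.reverse by simp]
  simp only [List.reverse_prefix]
  simpa using h

theorem pv_strip_idem (s : List Char) : PySem.Chars.strip (PySem.Chars.strip s) = PySem.Chars.strip s := by
  have hl : ∀ u : List Char, List.dropWhile PySem.Chars.isspace u = u →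
      PySem.Chars.lstrip (PySem.Chars.rstrip u) = PySem.Chars.rstrip u := by
    intro u hu
    have hpre : PySem.Chars.rstrip u <+: u := pv_rstrip_prefix u
    simp only [PySem.Chars.lstrip]
    rw [List.dropWhile_eq_self_iff]
    intro hlen
    have h0 : (PySem.Chars.rstrip u)[0] = u[0]'(Nat.lt_of_lt_of_le hlen hpre.length_le) :=
      List.IsPrefix.getElem hpre hlen
    rw [h0]
    exact (List.dropWhile_eq_self_iff.mp hu) (Nat.lt_of_lt_of_le hlen hpre.length_le)
  have hr : ∀ u : List Char, PySem.Chars.rstrip (PySem.Chars.rstrip u) = PySem.Chars.rstrip u := by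
    intro u
    simp [PySem.Chars.rstrip, List.dropWhile_idempotent]
  simp only [PySem.Chars.strip]
  rw [hl _ (by simp [PySem.Chars.lstrip, List.dropWhile_idempotent]), hr]

theorem pv_strip_sandwich (c d : Char) (m : List Char) (hc : PySem.Chars.isspace c = false)
    (hd : PySem.Chars.isspace d = false) :
    PySem.Chars.strip (c :: m ++ [d]) = c :: m ++ [d] := by
  simp [PySem.Chars.strip, PySem.Chars.lstrip, PySem.Chars.rstrip, hc, hd]

theorem mdApp_iff (w s : List Char) :
    mdApp w s = true ↔ w <+: s ∧ w <:+ s ∧ w.length * 2 < s.length := by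
  simp [mdApp, PySem.Chars.startswith_iff, PySem.Chars.endswith_iff, and_assoc]

theorem mdApp_decomp (w s : List Char) (h : mdApp w s = true) :
    ∃ mid, s = w ++ mid ++ w ∧ mid ≠ [] := by
  obtain ⟨hpre, hsuf, hlen⟩ := (mdApp_iff w s).mp h
  obtain ⟨u, hu⟩ := hsuf
  have hule : w.length ≤ u.length := by
    have := congrArg List.length hu
    simp at this
    omega
  have hpre' : w <+: u := by
    apply (List.isPrefix_append_of_length hule).mp
    rw [hu]; exact hpre
  obtain ⟨mid, hmid⟩ := hpre'
  refine ⟨mid, ?_, ?_⟩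
  · rw [← hu, ← hmid]
  · intro hnil
    subst hnil
    have := congrArg List.length hu
    simp [← hmid] at this
    omega

theorem mdSlice_sandwich (w mid : List Char) (hw : w ≠ []) :
    mdSlice w (w ++ mid ++ w) = mid := by
  have hk : 0 < w.length := List.length_pos_iff.mpr hw
  have hlen : (w ++ mid ++ w).length = w.length + mid.length + w.length := by simp; omega
  simp only [mdSlice, PySem.List.slice]
  rw [PySem.List.clampIdx_neg_natCast _ _ hk, PySem.List.clampIdx_natCast, hlen]
  have h1 : min w.length (w.length + mid.length + w.length) = w.length := by omega
  rw [h1]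
  have h2 : w.length + mid.length + w.length - w.length - w.length = mid.length := by omega
  rw [h2]
  rw [List.append_assoc, List.drop_left, List.take_left]

theorem peelMd_eq_none (s : List Char)
    (hfind : mdWrappers.find? (fun w => mdApp w (PySem.Chars.strip s)) = none) :
    peelMd s = PySem.Chars.strip s := by
  rw [peelMd]
  split
  · rename_i w hw
    rw [hw] at hfind
    simp at hfind
  · rfl

theorem peelMd_eq_some (s : List Char) (w : List Char)
    (hfind : mdWrappers.find? (fun w => mdApp w (PySem.Chars.strip s)) = some w) :
    peelMd s = peelMd (mdSlice w (PySem.Chars.strip s)) := by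
  rw [peelMd]
  split
  · rename_i w' hw'
    rw [hw'] at hfind
    rw [Option.some_inj.mp hfind]
  · rename_i hnone
    rw [hnone] at hfind
    simp at hfind

theorem peelMd_strip (s : List Char) : peelMd (PySem.Chars.strip s) = peelMd s := by
  cases hf : mdWrappers.find? (fun w => mdApp w (PySem.Chars.strip s)) with
  | none =>
    rw [peelMd_eq_none s hf, peelMd_eq_none (PySem.Chars.strip s) (by rw [pv_strip_idem]; exact hf),
      pv_strip_idem]
  | some w =>
    rw [peelMd_eq_some s w hf, peelMd_eq_some (PySem.Chars.strip s) w (by rw [pv_strip_idem]; exact hf),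
      pv_strip_idem]

theorem mdApp_false_head (a b : Char) (w' s' : List Char) (hne : a ≠ b) :
    mdApp (a :: w') (b :: s') = false := by
  apply Bool.eq_false_iff.mpr
  intro htrue
  obtain ⟨hpre, -, -⟩ := (mdApp_iff _ _).mp htrue
  exact hne (List.cons_prefix_cons.mp hpre).1

theorem mdApp_sandwich (w mid : List Char) (hw : w ≠ []) (hm : mid ≠ []) :
    mdApp w (w ++ mid ++ w) = true := by
  rw [mdApp_iff]
  refine ⟨⟨mid ++ w, by simp⟩, ⟨w ++ mid, by simp⟩, ?_⟩
  have h1 := List.length_pos_iff.mpr hm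
  have h2 := List.length_pos_iff.mpr hw
  simp only [List.length_append]
  omega

theorem pstar (c : Char) (hc : c = '*' ∨ c = '_') :
    ∀ (n : Nat) (m : List Char), m.length ≤ n → m ≠ [] →
      peelMd (c :: (m ++ [c])) = peelMd m := by
  intro n
  induction n with
  | zero =>
    intro m hlen hne
    exact absurd (List.length_eq_zero_iff.mp (Nat.le_zero.mp hlen)) hne
  | succ n ih =>
    intro m hlen hne
    have hcs : PySem.Chars.isspace c = false := by rcases hc with rfl | rfl <;> decide
    have hst : PySem.Chars.strip (c :: (m ++ [c])) = c :: (m ++ [c]) :=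
      pv_strip_sandwich c c m hcs hcs
    by_cases hform : ∃ m', m = c :: m' ++ [c] ∧ m' ≠ []
    · obtain ⟨m', hm, hm'⟩ := hform
      have ht : c :: (m ++ [c]) = [c, c] ++ m' ++ [c, c] := by subst hm; simp
      have happ : mdApp [c, c] (c :: (m ++ [c])) = true := by
        rw [ht]; exact mdApp_sandwich [c, c] m' (by simp) hm'
      have hfind : mdWrappers.find? (fun w => mdApp w (c :: (m ++ [c]))) = some [c, c] := by
        rcases hc with rfl | rfl
        · simp [mdWrappers, happ]
        · have hss : mdApp ['*', '*'] ('_' :: (m ++ ['_'])) = false :=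
            mdApp_false_head '*' '_' ['*'] (m ++ ['_']) (by decide)
          simp [mdWrappers, List.find?, happ, hss]
      have hleft : peelMd (c :: (m ++ [c])) = peelMd m' := by
        rw [peelMd_eq_some _ [c, c] (by rw [hst]; exact hfind), hst, ht,
          mdSlice_sandwich [c, c] m' (by simp)]
      have hright : peelMd m = peelMd m' := by
        have : m = c :: (m' ++ [c]) := by simpa using hm
        rw [this]
        apply ih m' _ hm'
        have := congrArg List.length this
        simp at this
        omega
      rw [hleft, hright]
    · have happ1 : mdApp [c] (c :: (m ++ [c])) = true := by
        have ht : c :: (m ++ [c]) = [c] ++ m ++ [c] := by simp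
        rw [ht]; exact mdApp_sandwich [c] m (by simp) hne
      have happ2 : mdApp [c, c] (c :: (m ++ [c])) = false := by
        apply Bool.eq_false_iff.mpr
        intro htrue
        obtain ⟨mid, hmid, hmidne⟩ := mdApp_decomp [c, c] _ htrue
        apply hform
        refine ⟨mid, ?_, hmidne⟩
        have h' : c :: (m ++ [c]) = c :: ((c :: mid ++ [c]) ++ [c]) := by rw [hmid]; simp
        injection h' with _ h2
        exact List.append_cancel_right h2
      have hfind : mdWrappers.find? (fun w => mdApp w (c :: (m ++ [c]))) = some [c] := by
        rcases hc with rfl | rfl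
        · have hu : mdApp ['_', '_'] ('*' :: (m ++ ['*'])) = false :=
            mdApp_false_head '_' '*' ['_'] (m ++ ['*']) (by decide)
          have hb : mdApp ['`'] ('*' :: (m ++ ['*'])) = false :=
            mdApp_false_head '`' '*' [] (m ++ ['*']) (by decide)
          simp [mdWrappers, List.find?, happ1, happ2, hu, hb]
        · have hs1 : mdApp ['*', '*'] ('_' :: (m ++ ['_'])) = false :=
            mdApp_false_head '*' '_' ['*'] (m ++ ['_']) (by decide)
          have hb : mdApp ['`'] ('_' :: (m ++ ['_'])) = false :=
            mdApp_false_head '`' '_' [] (m ++ ['_']) (by decide)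
          have hs2 : mdApp ['*'] ('_' :: (m ++ ['_'])) = false :=
            mdApp_false_head '*' '_' [] (m ++ ['_']) (by decide)
          simp [mdWrappers, List.find?, happ1, happ2, hs1, hb, hs2]
      rw [peelMd_eq_some _ [c] (by rw [hst]; exact hfind), hst,
        show c :: (m ++ [c]) = [c] ++ m ++ [c] by simp,
        mdSlice_sandwich [c] m (by simp)]

theorem peel_via (w mid : List Char) (hw' : w ≠ [])
    (hs : PySem.Chars.strip (w ++ mid ++ w) = w ++ mid ++ w)
    (hfind : mdWrappers.find? (fun v => mdApp v (w ++ mid ++ w)) = some w) :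
    peelMd (w ++ mid ++ w) = peelMd mid := by
  rw [peelMd_eq_some _ w (by rw [hs]; exact hfind), hs, mdSlice_sandwich w mid hw']

theorem absorb (s w : List Char) (hw : w ∈ mdWrappers) (h : mdApp w s = true)
    (hs : PySem.Chars.strip s = s) : peelMd (mdCut w s) = peelMd s := by
  have hwne : w ≠ [] := by
    intro hnil; subst hnil; revert hw; decide
  obtain ⟨mid, hmid, hmidne⟩ := mdApp_decomp w s h
  subst hmid
  rw [mdCut, peelMd_strip, mdSlice_sandwich w mid hwne]
  symm
  fin_cases hw
  · -- w = ['*','*']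
    exact peel_via _ mid (by simp) hs (by simp [mdWrappers, show mdApp ['*', '*'] ('*' :: '*' :: (mid ++ ['*', '*'])) = true from by simpa using h])
  · -- w = ['_','_']
    have h1 : mdApp ['*', '*'] ('_' :: '_' :: (mid ++ ['_', '_'])) = false := by
      simpa using mdApp_false_head '*' '_' ['*'] ('_' :: (mid ++ ['_', '_'])) (by decide)
    exact peel_via _ mid (by simp) hs (by simp [mdWrappers, h1, show mdApp ['_', '_'] ('_' :: '_' :: (mid ++ ['_', '_'])) = true from by simpa using h])
  · -- w = ['`']
    have h1 : mdApp ['*', '*'] ('`' :: (mid ++ ['`'])) = false := by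
      simpa using mdApp_false_head '*' '`' ['*'] (mid ++ ['`']) (by decide)
    have h2 : mdApp ['_', '_'] ('`' :: (mid ++ ['`'])) = false := by
      simpa using mdApp_false_head '_' '`' ['_'] (mid ++ ['`']) (by decide)
    exact peel_via _ mid (by simp) hs (by simp [mdWrappers, h1, h2, show mdApp ['`'] ('`' :: (mid ++ ['`'])) = true from by simpa using h])
  · -- w = ['*']
    by_cases h2 : mdApp ['*', '*'] (['*'] ++ mid ++ ['*']) = true
    · obtain ⟨inner, hinner, hinnerne⟩ := mdApp_decomp ['*', '*'] _ h2
      have hmid2 : mid = '*' :: (inner ++ ['*']) := by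
        have h' : '*' :: (mid ++ ['*']) = '*' :: (('*' :: (inner ++ ['*'])) ++ ['*']) := by
          simpa using hinner
        injection h' with _ hx
        exact List.append_cancel_right hx
      have hpeel : peelMd (['*'] ++ mid ++ ['*']) = peelMd inner := by
        have he : (['*'] ++ mid ++ ['*'] : List Char) = ['*', '*'] ++ inner ++ ['*', '*'] := by
          simpa using hinner
        rw [he]
        apply peel_via _ inner (by simp)
        · rw [← he]; exact hs
        · rw [← he]
          simp [mdWrappers, show mdApp ['*', '*'] ('*' :: (mid ++ ['*'])) = true from by simpa using h2]
      rw [hpeel, hmid2]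
      exact (pstar '*' (Or.inl rfl) inner.length inner (le_refl _) hinnerne).symm
    · have h2' : mdApp ['*', '*'] ('*' :: (mid ++ ['*'])) = false := by
        simpa using Bool.eq_false_iff.mpr h2
      have h3 : mdApp ['_', '_'] ('*' :: (mid ++ ['*'])) = false := by
        simpa using mdApp_false_head '_' '*' ['_'] (mid ++ ['*']) (by decide)
      have h4 : mdApp ['`'] ('*' :: (mid ++ ['*'])) = false := by
        simpa using mdApp_false_head '`' '*' [] (mid ++ ['*']) (by decide)
      exact peel_via _ mid (by simp) hs (by simp [mdWrappers, h2', h3, h4, show mdApp ['*'] ('*' :: (mid ++ ['*'])) = true from by simpa using h])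
  · -- w = ['_']
    by_cases h2 : mdApp ['_', '_'] (['_'] ++ mid ++ ['_']) = true
    · obtain ⟨inner, hinner, hinnerne⟩ := mdApp_decomp ['_', '_'] _ h2
      have hmid2 : mid = '_' :: (inner ++ ['_']) := by
        have h' : '_' :: (mid ++ ['_']) = '_' :: (('_' :: (inner ++ ['_'])) ++ ['_']) := by
          simpa using hinner
        injection h' with _ hx
        exact List.append_cancel_right hx
      have h1 : mdApp ['*', '*'] ('_' :: (mid ++ ['_'])) = false := by
        simpa using mdApp_false_head '*' '_' ['*'] (mid ++ ['_']) (by decide)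
      have hpeel : peelMd (['_'] ++ mid ++ ['_']) = peelMd inner := by
        have he : (['_'] ++ mid ++ ['_'] : List Char) = ['_', '_'] ++ inner ++ ['_', '_'] := by
          simpa using hinner
        rw [he]
        apply peel_via _ inner (by simp)
        · rw [← he]; exact hs
        · rw [← he]
          simp [mdWrappers, h1, show mdApp ['_', '_'] ('_' :: (mid ++ ['_'])) = true from by simpa using h2]
      rw [hpeel, hmid2]
      exact (pstar '_' (Or.inr rfl) inner.length inner (le_refl _) hinnerne).symm
    · have h2' : mdApp ['_', '_'] ('_' :: (mid ++ ['_'])) = false := by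
        simpa using Bool.eq_false_iff.mpr h2
      have h1 : mdApp ['*', '*'] ('_' :: (mid ++ ['_'])) = false := by
        simpa using mdApp_false_head '*' '_' ['*'] (mid ++ ['_']) (by decide)
      have h4 : mdApp ['`'] ('_' :: (mid ++ ['_'])) = false := by
        simpa using mdApp_false_head '`' '_' [] (mid ++ ['_']) (by decide)
      have h5 : mdApp ['*'] ('_' :: (mid ++ ['_'])) = false := by
        simpa using mdApp_false_head '*' '_' [] (mid ++ ['_']) (by decide)
      exact peel_via _ mid (by simp) hs (by simp [mdWrappers, h1, h2', h4, h5, show mdApp ['_'] ('_' :: (mid ++ ['_'])) = true from by simpa using h])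

theorem foldAbsorb : ∀ (ws : List (List Char)), (∀ w ∈ ws, w ∈ mdWrappers) →
    ∀ (s : List Char) (b : Bool), PySem.Chars.strip s = s →
      peelMd ((ws.foldl mdStep (s, b)).1) = peelMd s := by
  intro ws
  induction ws with
  | nil => intro _ s b _; rfl
  | cons w ws ih =>
    intro hmem s b hs
    rw [List.foldl_cons, mdStep]
    by_cases h : mdApp w s = true
    · rw [if_pos h]
      have hstrip : PySem.Chars.strip (mdCut w s) = mdCut w s := by
        rw [mdCut]; exact pv_strip_idem _
      rw [ih (fun x hx => hmem x (List.mem_cons_of_mem _ hx)) (mdCut w s) true hstrip]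
      exact absorb s w (hmem w (List.mem_cons_self ..)) h hs
    · rw [if_neg h]
      exact ih (fun x hx => hmem x (List.mem_cons_of_mem _ hx)) s b hs

theorem mdFold_strip : ∀ (ws : List (List Char)) (s : List Char) (b : Bool),
    PySem.Chars.strip s = s →
    PySem.Chars.strip ((ws.foldl mdStep (s, b)).1) = (ws.foldl mdStep (s, b)).1 := by
  intro ws
  induction ws with
  | nil => intro s b hs; exact hs
  | cons w ws ih =>
    intro s b hs
    rw [List.foldl_cons, mdStep]
    by_cases h : mdApp w s = true
    · rw [if_pos h]
      exact ih (mdCut w s) true (by rw [mdCut]; exact pv_strip_idem _)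
    · rw [if_neg h]
      exact ih s b hs

theorem mdFold_all_false : ∀ (ws : List (List Char)) (s : List Char),
    (ws.foldl mdStep (s, false)).2 = false → ∀ w ∈ ws, mdApp w s = false := by
  intro ws
  induction ws with
  | nil => intro s _ w hw; exact absurd hw (List.not_mem_nil)
  | cons w ws ih =>
    intro s hfalse v hv
    have happ : mdApp w s = false := by
      apply Bool.eq_false_iff.mpr
      intro htrue
      rw [List.foldl_cons, mdStep, if_pos htrue] at hfalse
      rw [mdFold_snd_true ws _] at hfalse
      exact Bool.noConfusion hfalse
    rw [List.foldl_cons, mdStep, if_neg (by rw [happ]; exact Bool.false_ne_true)] at hfalse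
    rcases List.mem_cons.mp hv with rfl | hv'
    · exact happ
    · exact ih s hfalse v hv'

theorem peelMd_fixed (s : List Char) (hs : PySem.Chars.strip s = s)
    (hnone : ∀ w ∈ mdWrappers, mdApp w s = false) : peelMd s = s := by
  rw [peelMd_eq_none, hs]
  rw [hs]
  exact List.find?_eq_none.mpr (fun w hw => by rw [hnone w hw]; exact Bool.false_ne_true)

theorem mdMain : ∀ (n : Nat) (s : List Char), s.length ≤ n → PySem.Chars.strip s = s →
    mdLoop s true = peelMd s := by
  have base : ∀ s : List Char, PySem.Chars.strip s = s → (mdPass s).2 = false →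
      mdLoop s false = peelMd s := by
    intro s hs hb
    rw [mdLoop, if_neg (by simp)]
    symm
    exact peelMd_fixed s hs (mdFold_all_false mdWrappers s (by rw [← mdPass]; exact hb))
  intro n
  induction n with
  | zero =>
    intro s hlen hs
    have hnil : s = [] := List.length_eq_zero_iff.mp (Nat.le_zero.mp hlen)
    subst hnil
    rw [mdLoop, if_neg (by simp)]
    symm
    apply peelMd_fixed [] hs
    intro w hw
    apply Bool.eq_false_iff.mpr
    intro htrue
    have := ((mdApp_iff _ _).mp htrue).2.2
    simp at this
  | succ n ih =>
    intro s hlen hs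
    by_cases hnil : s = []
    · subst hnil
      rw [mdLoop, if_neg (by simp)]
      symm
      apply peelMd_fixed [] hs
      intro w hw
      apply Bool.eq_false_iff.mpr
      intro htrue
      have := ((mdApp_iff _ _).mp htrue).2.2
      simp at this
    · rw [mdLoop, if_pos ⟨hnil, rfl⟩]
      cases hb : (mdPass s).2
      · have hp : mdPass s = (s, false) := by
          rw [mdPass]
          exact mdFold_false mdWrappers s false (by rw [← mdPass]; exact hb)
        rw [hp]
        exact base s hs (by rw [hp])
      · have hlt : ((mdPass s).1).length < s.length := by
          rw [mdPass]
          exact mdFold_true_lt mdWrappers (fun _ hw => hw) s (by rw [← mdPass]; exact hb)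
        have hstrip : PySem.Chars.strip ((mdPass s).1) = (mdPass s).1 := by
          rw [mdPass]
          exact mdFold_strip mdWrappers s false hs
        rw [ih (mdPass s).1 (by omega) hstrip]
        rw [mdPass]
        exact foldAbsorb mdWrappers (fun _ hw => hw) s false hs

-- ---- B-side proof: the cursor window [i, j) tracks peelMd of the current window ----

-- the window B's cursors denote
def pwin (s : List Char) (i j : Nat) : List Char := (s.drop i).take (j - i)

theorem bTrimL_le (s : List Char) (i j : Nat) : i ≤ j → bTrimL s i j ≤ j := by
  fun_induction bTrimL s i j with
  | case1 i h ih => intro _; exact ih (by omega)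
  | case2 i h => intro hij; exact hij

theorem le_bTrimR (s : List Char) (i j : Nat) : i ≤ j → i ≤ bTrimR s i j := by
  fun_induction bTrimR s i j with
  | case1 j h ih => intro _; exact ih (by omega)
  | case2 j h => intro hij; exact hij

theorem pwin_length (s : List Char) (i j : Nat) (hij : i ≤ j) (hj : j ≤ s.length) :
    (pwin s i j).length = j - i := by
  simp [pwin]
  omega

theorem pwin_cons (s : List Char) (i j : Nat) (hij : i < j) (hj : j ≤ s.length) :
    pwin s i j = s[i]'(by omega) :: pwin s (i + 1) j := by
  rw [pwin, List.drop_eq_getElem_cons (show i < s.length by omega),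
    show j - i = (j - (i + 1)) + 1 by omega, List.take_succ_cons, pwin]

theorem pwin_snoc (s : List Char) (i j : Nat) (hij : i < j) (hj : j ≤ s.length) :
    pwin s i j = pwin s i (j - 1) ++ [s[j - 1]'(by omega)] := by
  rw [pwin, show j - i = (j - 1 - i) + 1 by omega, List.take_succ, pwin]
  congr 1
  have hidx : i + (j - 1 - i) = j - 1 := by omega
  rw [List.getElem?_drop, hidx, List.getElem?_eq_getElem (by omega)]
  rfl

theorem pv_rstrip_snoc (u : List Char) (c : Char) :
    PySem.Chars.rstrip (u ++ [c]) =
      if PySem.Chars.isspace c then PySem.Chars.rstrip u else u ++ [c] := by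
  simp only [PySem.Chars.rstrip, List.reverse_append, List.reverse_cons, List.reverse_nil,
    List.nil_append, List.singleton_append, List.dropWhile_cons]
  split_ifs with hc <;> simp [hc]

theorem bTrimL_spec : ∀ (n : Nat) (s : List Char) (i j : Nat), j - i ≤ n → i ≤ j →
    j ≤ s.length → PySem.Chars.lstrip (pwin s i j) = pwin s (bTrimL s i j) j := by
  intro n
  induction n with
  | zero =>
    intro s i j hn hij hj
    have : i = j := by omega
    subst this
    rw [bTrimL, dif_neg (by omega)]
    simp [pwin, PySem.Chars.lstrip]
  | succ n ih =>
    intro s i j hn hij hj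
    rw [bTrimL]
    by_cases h : i < j ∧ PySem.Chars.isspace (s.getD i ' ') = true
    · rw [dif_pos h]
      have hilt : i < s.length := by omega
      have hget : s.getD i ' ' = s[i]'hilt := List.getD_eq_getElem s ' ' hilt
      rw [pwin_cons s i j h.1 hj, PySem.Chars.lstrip, List.dropWhile_cons_of_pos (by rw [← hget]; exact h.2)]
      exact ih s (i + 1) j (by omega) (by omega) hj
    · rw [dif_neg h]
      by_cases hij' : i < j
      · have hns : PySem.Chars.isspace (s.getD i ' ') = false := by
          cases hx : PySem.Chars.isspace (s.getD i ' ')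
          · rfl
          · exact absurd ⟨hij', hx⟩ h
        have hilt : i < s.length := by omega
        have hget : s.getD i ' ' = s[i]'hilt := List.getD_eq_getElem s ' ' hilt
        rw [pwin_cons s i j hij' hj, PySem.Chars.lstrip,
          List.dropWhile_cons_of_neg (by rw [← hget, hns]; simp), ← pwin_cons s i j hij' hj]
      · have : i = j := by omega
        subst this
        simp [pwin, PySem.Chars.lstrip]

theorem bTrimR_spec : ∀ (n : Nat) (s : List Char) (i j : Nat), j - i ≤ n → i ≤ j →
    j ≤ s.length → PySem.Chars.rstrip (pwin s i j) = pwin s i (bTrimR s i j) := by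
  intro n
  induction n with
  | zero =>
    intro s i j hn hij hj
    have : i = j := by omega
    subst this
    rw [bTrimR, dif_neg (by omega)]
    simp [pwin, PySem.Chars.rstrip]
  | succ n ih =>
    intro s i j hn hij hj
    rw [bTrimR]
    by_cases h : i < j ∧ PySem.Chars.isspace (s.getD (j - 1) ' ') = true
    · rw [dif_pos h]
      have hjlt : j - 1 < s.length := by omega
      have hget : s.getD (j - 1) ' ' = s[j - 1]'hjlt := List.getD_eq_getElem s ' ' hjlt
      rw [pwin_snoc s i j h.1 hj, pv_rstrip_snoc, if_pos (by rw [← hget]; exact h.2)]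
      exact ih s i (j - 1) (by omega) (by omega) (by omega)
    · rw [dif_neg h]
      by_cases hij' : i < j
      · have hns : PySem.Chars.isspace (s.getD (j - 1) ' ') = false := by
          cases hx : PySem.Chars.isspace (s.getD (j - 1) ' ')
          · rfl
          · exact absurd ⟨hij', hx⟩ h
        have hjlt : j - 1 < s.length := by omega
        have hget : s.getD (j - 1) ' ' = s[j - 1]'hjlt := List.getD_eq_getElem s ' ' hjlt
        rw [pwin_snoc s i j hij' hj, pv_rstrip_snoc, if_neg (by rw [← hget, hns]; simp),
          ← pwin_snoc s i j hij' hj]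
      · have : i = j := by omega
        subst this
        simp [pwin, PySem.Chars.rstrip]

-- the two trim loops together compute strip of the window
theorem bTrim_strip (s : List Char) (i j : Nat) (hij : i ≤ j) (hj : j ≤ s.length) :
    pwin s (bTrimL s i j) (bTrimR s (bTrimL s i j) j) = PySem.Chars.strip (pwin s i j) := by
  rw [PySem.Chars.strip, bTrimL_spec (j - i) s i j (le_refl _) hij hj,
    bTrimR_spec (j - bTrimL s i j) s (bTrimL s i j) j (le_refl _) (bTrimL_le s i j hij) hj]

-- B's in-window wrapper test agrees with A's wrapper test on the window
theorem bCond_eq (s : List Char) (i j : Nat) (w : List Char) (hij : i ≤ j)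
    (hj : j ≤ s.length) : bCond s i j w = mdApp w (pwin s i j) := by
  by_cases hg : 2 * w.length < j - i
  · have hk : w.length ≤ j - i := by omega
    have hsl1 : PySem.List.slice s (some (i : Int)) (some ((i + w.length : Nat) : Int)) =
        (s.drop i).take w.length := by
      rw [PySem.List.slice_natCast]
      congr 1
      omega
    have hsl2 : PySem.List.slice s (some ((j - w.length : Nat) : Int)) (some (j : Int)) =
        (s.drop (j - w.length)).take w.length := by
      rw [PySem.List.slice_natCast]
      congr 1
      omega
    have hsw : PySem.Chars.startswith (pwin s i j) w = ((s.drop i).take w.length == w) := by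
      rw [Bool.eq_iff_iff, PySem.Chars.startswith_iff, beq_iff_eq, List.prefix_iff_eq_take]
      constructor
      · intro h
        rw [pwin, List.take_take, show min w.length (j - i) = w.length by omega] at h
        exact h.symm
      · intro h
        rw [pwin, List.take_take, show min w.length (j - i) = w.length by omega]
        exact h.symm
    have hdrop : List.drop ((pwin s i j).length - w.length) (pwin s i j) =
        (s.drop (j - w.length)).take w.length := by
      rw [pwin_length s i j hij hj, pwin, List.drop_take, List.drop_drop,
        show j - i - (j - i - w.length) = w.length by omega,
        show i + (j - i - w.length) = j - w.length by omega]
    have hew : PySem.Chars.endswith (pwin s i j) w = ((s.drop (j - w.length)).take w.length == w) := by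
      rw [Bool.eq_iff_iff, PySem.Chars.endswith_iff, beq_iff_eq, List.suffix_iff_eq_drop]
      rw [hdrop]
      exact ⟨fun h => h.symm, fun h => h.symm⟩
    have hlen : decide (w.length * 2 < (pwin s i j).length) = true := by
      rw [decide_eq_true_iff, pwin_length s i j hij hj]
      omega
    rw [bCond, mdApp, hsl1, hsl2, hsw, hew, hlen, decide_eq_true hg]
    cases h1 : ((s.drop i).take w.length == w) <;> cases h2 : ((s.drop (j - w.length)).take w.length == w) <;> rfl
  · have h1 : decide (2 * w.length < j - i) = false := by
      rw [decide_eq_false_iff_not]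
      exact hg
    have h2 : decide (w.length * 2 < (pwin s i j).length) = false := by
      rw [decide_eq_false_iff_not, pwin_length s i j hij hj]
      omega
    rw [bCond, mdApp, h1, h2]
    cases PySem.Chars.startswith (pwin s i j) w <;>
      cases PySem.Chars.endswith (pwin s i j) w <;> rfl

theorem bFind_eq (s : List Char) (i j : Nat) (hij : i ≤ j) (hj : j ≤ s.length) :
    pvWrapB.find? (bCond s i j) = mdWrappers.find? (fun w => mdApp w (pwin s i j)) := by
  have hpq : bCond s i j = fun w => mdApp w (pwin s i j) :=
    funext (fun w => bCond_eq s i j w hij hj)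
  rw [hpq]
  rfl

-- moving both cursors inward by the wrapper length is A's inner slice on the window
theorem pwin_peel (s : List Char) (i j : Nat) (w : List Char) (hwne : w ≠ [])
    (hij : i ≤ j) (hj : j ≤ s.length) (h : mdApp w (pwin s i j) = true) :
    pwin s (i + w.length) (j - w.length) = mdSlice w (pwin s i j) := by
  have hlen : w.length * 2 < (pwin s i j).length := ((mdApp_iff _ _).mp h).2.2
  rw [pwin_length s i j hij hj] at hlen
  obtain ⟨mid, hmid, -⟩ := mdApp_decomp w _ h
  have hmidlen : mid.length = j - i - 2 * w.length := by
    have := congrArg List.length hmid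
    rw [pwin_length s i j hij hj] at this
    simp at this
    omega
  rw [hmid, mdSlice_sandwich w mid hwne]
  have hstep : pwin s (i + w.length) (j - w.length) =
      (List.drop w.length (pwin s i j)).take (j - i - 2 * w.length) := by
    rw [pwin, pwin, List.drop_take, List.drop_drop, List.take_take]
    congr 1
    omega
  rw [hstep, hmid, List.append_assoc, List.drop_left, ← hmidlen, List.take_left]

-- one none-step of bLoop lands on the stripped window with no wrapper applicable
theorem bLoop_none (s : List Char) (i j : Nat) (hij : i ≤ j) (hj : j ≤ s.length)
    (hf : pvWrapB.find? (bCond s (bTrimL s i j) (bTrimR s (bTrimL s i j) j)) = none) :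
    pwin s (bTrimL s i j) (bTrimR s (bTrimL s i j) j) = peelMd (pwin s i j) := by
  have h1 : i ≤ bTrimL s i j := le_bTrimL s i j
  have h2 : bTrimL s i j ≤ j := bTrimL_le s i j hij
  have h3 : bTrimL s i j ≤ bTrimR s (bTrimL s i j) j := le_bTrimR s (bTrimL s i j) j h2
  have h4 : bTrimR s (bTrimL s i j) j ≤ j := bTrimR_le s (bTrimL s i j) j
  have hwin := bTrim_strip s i j hij hj
  rw [bFind_eq s (bTrimL s i j) (bTrimR s (bTrimL s i j) j) h3 (by omega), hwin] at hf
  rw [hwin, peelMd_eq_none (pwin s i j) hf]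

theorem bMain : ∀ (n : Nat) (s : List Char) (i j : Nat), j - i ≤ n → i ≤ j → j ≤ s.length →
    pwin s (bLoop s i j).1 (bLoop s i j).2 = peelMd (pwin s i j) := by
  intro n
  induction n with
  | zero =>
    intro s i j hn hij hj
    rw [bLoop]
    split
    · rename_i w hf
      exfalso
      have hcond := List.find?_some hf
      have hk : 2 * w.length < bTrimR s (bTrimL s i j) j - bTrimL s i j := by
        have := (Bool.and_eq_true ..).mp ((Bool.and_eq_true ..).mp hcond).1
        exact of_decide_eq_true this.1
      have h1 := le_bTrimL s i j
      have h2 := bTrimR_le s (bTrimL s i j) j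
      omega
    · rename_i hf
      exact bLoop_none s i j hij hj hf
  | succ n ih =>
    intro s i j hn hij hj
    rw [bLoop]
    split
    · rename_i w hf
      have hcond := List.find?_some hf
      have hk : 2 * w.length < bTrimR s (bTrimL s i j) j - bTrimL s i j := by
        have := (Bool.and_eq_true ..).mp ((Bool.and_eq_true ..).mp hcond).1
        exact of_decide_eq_true this.1
      have hwpos : 1 ≤ w.length := pvWrapB_len_pos w (List.mem_of_find?_eq_some hf)
      have hwne : w ≠ [] := by
        intro hx
        subst hx
        simp at hwpos
      have h1 : i ≤ bTrimL s i j := le_bTrimL s i j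
      have h2 : bTrimL s i j ≤ j := bTrimL_le s i j hij
      have h3 : bTrimL s i j ≤ bTrimR s (bTrimL s i j) j := le_bTrimR s (bTrimL s i j) j h2
      have h4 : bTrimR s (bTrimL s i j) j ≤ j := bTrimR_le s (bTrimL s i j) j
      have hwin := bTrim_strip s i j hij hj
      have hfind' : mdWrappers.find?
          (fun v => mdApp v (PySem.Chars.strip (pwin s i j))) = some w := by
        rw [← hwin, ← bFind_eq s (bTrimL s i j) (bTrimR s (bTrimL s i j) j) h3 (by omega)]
        exact hf
      have happ : mdApp w (pwin s (bTrimL s i j) (bTrimR s (bTrimL s i j) j)) = true := by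
        rw [hwin]
        simpa using List.find?_some hfind'
      have hih := ih s (bTrimL s i j + w.length) (bTrimR s (bTrimL s i j) j - w.length)
        (by omega) (by omega) (by omega)
      rw [hih, pwin_peel s (bTrimL s i j) (bTrimR s (bTrimL s i j) j) w hwne h3 (by omega) happ,
        hwin, ← peelMd_eq_some (pwin s i j) w hfind']
    · rename_i hf
      exact bLoop_none s i j hij hj hf

-- ===== VERDICT (by name: the statement is the Claim_ definition above) =====
theorem strip_markdown_wrappers_py_spec : Claim_equal_strip_markdown_wrappers_py := by
  intro text _
  unfold Spec_strip_markdown_wrappers_py strip_markdown_wrappers_py strip_markdown_wrappers_py_alt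
  have hA : mdLoop (PySem.Chars.strip text.toList) true = peelMd text.toList := by
    rw [mdMain (PySem.Chars.strip text.toList).length (PySem.Chars.strip text.toList)
      (le_refl _) (pv_strip_idem _)]
    exact peelMd_strip _
  have hB := bMain text.toList.length text.toList 0 text.toList.length (by omega)
    (Nat.zero_le _) (le_refl _)
  rw [PySem.List.slice_natCast, hA]
  have hwin0 : pwin text.toList 0 text.toList.length = text.toList := by
    simp [pwin]
  rw [hwin0] at hB
  rw [show (text.toList.drop (bLoop text.toList 0 text.toList.length).1).take
      ((bLoop text.toList 0 text.toList.length).2 - (bLoop text.toList 0 text.toList.length).1) =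
      pwin text.toList (bLoop text.toList 0 text.toList.length).1
        (bLoop text.toList 0 text.toList.length).2 from rfl, hB]
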